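-- pv_equiv track=rewrite | github.com/aheadley/python-crunchyroll | setup.py | format_requirement
-- ===== SOURCE A (Python) =====
-- def format_requirement(req):
--     COMP_CHARS = '<>!='
--     try:
--         idx = min(req.find(c) for c in COMP_CHARS if req.find(c) > 0)
--     except ValueError:
--         return req
--     else:
--         return '%s (%s)' % (req[:idx], req[idx:])
-- ===== SOURCE B (Python) =====
-- def format_requirement(req):
--     for i, ch in enumerate(req):
--         if i > 0 and ch in '<>!=':
--             return '%s (%s)' % (req[:i], req[i:])
--     return req
-- ===== Notes on version B (the rewrite author's own statement) =====
-- stated objective: simpler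
-- what changed: A runs four separate str.find scans (one per comparison character), filters the positive indices, takes min() and catches ValueError; B is a single left-to-right enumerate scan that splits at the first comparison character after position 0, with an explicit fall-through return. Pre_ excludes strings that start with a comparison character whose next comparison character is that same character again: no requirement string starts with an operator, and on that corner A's find(c) > 0 filter silently discards the repeated character, so either behaviour is as defensible as the other.
-- outside the precondition, e.g. on format_requirement('=x=1'): A returns '=x=1', B returns '=x (=1)'; on format_requirement('<pkg<2'): A returns '<pkg<2', B returns '<pkg (<2)'
import Mathlib
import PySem

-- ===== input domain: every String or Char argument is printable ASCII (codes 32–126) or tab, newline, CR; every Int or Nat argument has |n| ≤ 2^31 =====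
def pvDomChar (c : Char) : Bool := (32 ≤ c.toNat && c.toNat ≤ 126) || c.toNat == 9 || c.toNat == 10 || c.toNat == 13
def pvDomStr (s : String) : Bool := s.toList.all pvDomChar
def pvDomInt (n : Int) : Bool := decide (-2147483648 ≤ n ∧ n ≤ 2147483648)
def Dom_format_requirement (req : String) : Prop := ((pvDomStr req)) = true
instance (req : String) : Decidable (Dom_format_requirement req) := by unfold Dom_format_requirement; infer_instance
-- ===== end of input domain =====

-- B replaces A's four per-character find scans + min() + try/except with one left-to-right
-- enumerate scan that splits at the first comparison character after position 0 (simpler: one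
-- pass, explicit fall-through instead of an exception); return value only, no side effects.

-- ===== PORT A =====
-- the generator expression: [req.find(c) for c in COMP_CHARS if req.find(c) > 0]
def aCands (req : String) : List Int :=
  ((['<', '>', '!', '=']).filter
      (fun c => 0 < PySem.Str.find req (String.ofList [c]))).map
    (fun c => PySem.Str.find req (String.ofList [c]))

def format_requirement (req : String) : String :=
  -- idx = min(...)  ; except ValueError: return req ; else '%s (%s)' % (req[:idx], req[idx:])
  match PySem.List.min? (aCands req) (fun x => x) with
  | none => req
  | some idx =>
      PySem.Str.slice req none (some idx) ++ " (" ++ PySem.Str.slice req (some idx) none ++ ")"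

-- ===== PORT B =====
-- for i, ch in enumerate(req):
--   if i > 0 and ch in '<>!=': return '%s (%s)' % (req[:i], req[i:])
-- return req
def fmtScan (req : String) : List (Int × Char) → String
  | [] => req                          -- loop fell through: return req
  | (i, ch) :: rest =>
      if 0 < i ∧ PySem.Str.isIn (String.ofList [ch]) "<>!=" = true then
        PySem.Str.slice req none (some i) ++ " (" ++ PySem.Str.slice req (some i) none ++ ")"
      else fmtScan req rest

def format_requirement_alt (req : String) : String :=
  fmtScan req (PySem.List.enumerate req.toList 0)

-- ===== PRECONDITION & SPEC =====
def isCompChar (c : Char) : Bool := c == '<' || c == '>' || c == '!' || c == '='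

-- Pre_ excludes strings that start with a comparison character whose next comparison
-- character is that same character again: no requirement string starts with an operator, and
-- on that corner A's `find(c) > 0` filter silently discards the repeated character, so either
-- behaviour is as defensible as the other.
def Pre_format_requirement (req : String) : Prop :=
  (match req.toList with
   | [] => true
   | c0 :: rest =>
     !isCompChar c0 ||
       (match rest.findIdx? (fun ch => isCompChar ch) with
        | none => true
        | some j => rest[j]? != some c0)) = true
instance (req : String) : Decidable (Pre_format_requirement req) := by
  unfold Pre_format_requirement; infer_instance

def pvWitness_format_requirement : String := "foo>=1.0"

def Spec_format_requirement (req : String) (out : String) : Prop :=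
  out = format_requirement_alt req
instance (req : String) (out : String) : Decidable (Spec_format_requirement req out) := by
  unfold Spec_format_requirement; infer_instance

-- ===== CLAIM (what is proved, stated in full; the proofs are below) =====
def Claim_equal_format_requirement : Prop :=
  ∀ (req : String), Dom_format_requirement req → Pre_format_requirement req →
    Spec_format_requirement req (format_requirement req)

-- ===== LEMMAS AND PROOFS =====

theorem isCompChar_mem_iff (c : Char) : isCompChar c = true ↔ c ∈ ['<', '>', '!', '='] := by
  simp [isCompChar]
  tauto

theorem prefix_single {c : Char} {xs : List Char} : [c] <+: xs ↔ xs.head? = some c := by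
  cases xs with
  | nil => simp
  | cons a t => simp [List.cons_prefix_cons, eq_comm]

theorem find_single_none {xs : List Char} {c : Char}
    (h : xs.findIdx? (fun x => x = c) = none) : PySem.Chars.find xs [c] = -1 := by
  rw [PySem.Chars.find_eq_neg_one_iff, List.singleton_infix_iff]
  intro hc
  simpa using List.findIdx?_eq_none_iff.mp h c hc

theorem find_single_some {xs : List Char} {c : Char} {j : ℕ}
    (h : xs.findIdx? (fun x => x = c) = some j) : PySem.Chars.find xs [c] = (j : ℤ) := by
  obtain ⟨hj, hpj, hmin⟩ := List.findIdx?_eq_some_iff_getElem.mp h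
  have hpj' : xs[j] = c := by simpa using hpj
  have hmem : c ∈ xs := hpj' ▸ List.getElem_mem hj
  have hnn : 0 ≤ PySem.Chars.find xs [c] := by
    rw [PySem.Chars.find_nonneg_iff, List.singleton_infix_iff]; exact hmem
  obtain ⟨hpre, hmin'⟩ := PySem.Chars.find_spec hnn
  have hk1 : xs[(PySem.Chars.find xs [c]).toNat]? = some c := by
    rw [← List.head?_drop]; exact prefix_single.mp hpre
  have hkj : (PySem.Chars.find xs [c]).toNat ≤ j := by
    by_contra hlt
    exact hmin' j (by omega)
      (prefix_single.mpr (by rw [List.head?_drop, List.getElem?_eq_getElem hj, hpj']))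
  have hjk : ¬ (PySem.Chars.find xs [c]).toNat < j := by
    intro hlt
    have hlen : (PySem.Chars.find xs [c]).toNat < xs.length := by omega
    have hget : xs[(PySem.Chars.find xs [c]).toNat] = c := by
      have := hk1
      rwa [List.getElem?_eq_getElem hlen, Option.some.injEq] at this
    exact hmin _ hlt (by simp [hget])
  omega

theorem isIn_single_eq (ch : Char) :
    PySem.Str.isIn (String.ofList [ch]) "<>!=" = isCompChar ch := by
  rw [Bool.eq_iff_iff, PySem.Str.isIn_iff_infix, String.toList_ofList]
  rw [show ("<>!=" : String).toList = ['<', '>', '!', '='] from rfl]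
  rw [List.singleton_infix_iff]
  exact (isCompChar_mem_iff ch).symm

theorem fmtScan_enum (req : String)
    (xs : List Char) : ∀ (s : ℤ), 1 ≤ s →
    fmtScan req (PySem.List.enumerate xs s) =
      match xs.findIdx? (fun ch => isCompChar ch) with
      | none => req
      | some j =>
          PySem.Str.slice req none (some (s + j)) ++ " (" ++
            PySem.Str.slice req (some (s + j)) none ++ ")" := by
  induction xs with
  | nil =>
    intro s hs
    simp [PySem.List.enumerate_nil, fmtScan, List.findIdx?_nil]
  | cons a t ih =>
    intro s hs
    rw [PySem.List.enumerate_cons]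
    simp only [fmtScan]
    rw [List.findIdx?_cons]
    by_cases hpa : isCompChar a = true
    · rw [if_pos ⟨by omega, by rw [isIn_single_eq]; exact hpa⟩]
      rw [if_pos (by simpa using hpa)]
      norm_num
    · rw [if_neg ?hneg, if_neg (by simpa using hpa)]
      case hneg =>
        intro hc
        exact hpa (by rw [← isIn_single_eq]; exact hc.2)
      rw [ih (s + 1) (by omega)]
      cases hft : t.findIdx? (fun ch => isCompChar ch) with
      | none => simp
      | some j =>
        simp only [Option.map_some]
        have h2 : s + 1 + (j : ℤ) = s + (((j + 1 : ℕ)) : ℤ) := by push_cast; ring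
        rw [h2]

theorem pos_find_elim {l : List Char} {c0 : Char} {rest : List Char} (hl : l = c0 :: rest)
    {c : Char} (h : 0 < PySem.Chars.find l [c]) :
    ∃ k, ∃ hk : k < rest.length, rest[k] = c ∧
      (∀ i, i < k → ∀ hi : i < rest.length, rest[i] ≠ c) ∧
      PySem.Chars.find l [c] = (k : ℤ) + 1 ∧ c ≠ c0 := by
  cases hfi : l.findIdx? (fun x => x = c) with
  | none => rw [find_single_none hfi] at h; omega
  | some m =>
    have hf := find_single_some hfi
    obtain ⟨hm, hpm, hmin⟩ := List.findIdx?_eq_some_iff_getElem.mp hfi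
    cases m with
    | zero => rw [hf] at h; norm_num at h
    | succ k =>
      subst hl
      have hk : k < rest.length := by simpa using hm
      refine ⟨k, hk, ?_, ?_, ?_, ?_⟩
      · have : (c0 :: rest)[k + 1] = c := by simpa using hpm
        simpa using this
      · intro i hik hi hic
        have := hmin (i + 1) (by omega)
        simp at this
        exact this hic
      · rw [hf]; push_cast; ring
      · have := hmin 0 (by omega)
        simp at this
        exact fun he => this he.symm

theorem aCands_nil {req : String}
    (h : ∀ c, isCompChar c = true → ¬ 0 < PySem.Chars.find req.toList [c]) :
    aCands req = [] := by
  unfold aCands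
  rw [List.map_eq_nil_iff, List.filter_eq_nil_iff]
  intro a ha
  simp only [decide_eq_true_eq, PySem.Str.find_eq, String.toList_ofList]
  exact h a ((isCompChar_mem_iff a).mpr ha)

theorem main_equal : ∀ (req : String), Pre_format_requirement req →
    format_requirement req = format_requirement_alt req := by
  intro req hpre
  unfold format_requirement format_requirement_alt
  cases hl : req.toList with
  | nil =>
    rw [PySem.List.enumerate_nil]
    have hc : aCands req = [] := aCands_nil (by
      intro c _
      rw [hl, show PySem.Chars.find [] [c] = -1 from find_single_none (by simp)]
      omega)
    rw [hc, (PySem.List.min?_eq_none_iff _ _).mpr rfl]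
    rfl
  | cons c0 rest =>
    unfold Pre_format_requirement at hpre
    rw [hl] at hpre
    rw [PySem.List.enumerate_cons, show (0:ℤ) + 1 = 1 from by norm_num]
    simp only [fmtScan]
    rw [if_neg (fun hc => absurd hc.1 (by norm_num))]
    rw [fmtScan_enum req rest 1 (by norm_num)]
    cases hfi : rest.findIdx? (fun ch => isCompChar ch) with
    | none =>
      have hnone := List.findIdx?_eq_none_iff.mp hfi
      have hc : aCands req = [] := aCands_nil (by
        intro c hcomp hpos
        obtain ⟨k, hk, hrk, -, -, -⟩ := pos_find_elim hl hpos
        have hfalse := hnone rest[k] (List.getElem_mem hk)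
        rw [hrk] at hfalse
        simp [hcomp] at hfalse)
      rw [hc, (PySem.List.min?_eq_none_iff _ _).mpr rfl]
    | some j =>
      obtain ⟨hj, hpj, hminj⟩ := List.findIdx?_eq_some_iff_getElem.mp hfi
      have hcomp : isCompChar rest[j] = true := by simpa using hpj
      have hne' : rest[j] ≠ c0 := by
        have hpre : (!isCompChar c0 ||
            (match rest.findIdx? (fun ch => isCompChar ch) with
             | none => true
             | some j => rest[j]? != some c0)) = true := hpre
        rw [hfi] at hpre
        simp only [List.getElem?_eq_getElem hj] at hpre
        intro he
        rcases Bool.or_eq_true_iff.mp hpre with h | h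
        · rw [he] at hcomp; simp [hcomp] at h
        · rw [he] at h; simp at h
      have hfch : PySem.Chars.find req.toList [rest[j]] = (j : ℤ) + 1 := by
        have hidx : req.toList.findIdx? (fun x => x = rest[j]) = some (j + 1) := by
          rw [hl]
          apply List.findIdx?_eq_some_iff_getElem.mpr
          refine ⟨by simpa using Nat.succ_lt_succ hj, by simp, ?_⟩
          intro i hi
          cases i with
          | zero => simpa using fun he => hne' he.symm
          | succ i' =>
            have hni := hminj i' (by omega)
            simp only [List.getElem_cons_succ, decide_eq_true_eq]
            intro heq
            apply hni
            rw [heq]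
            exact hpj
        have := find_single_some hidx
        simpa using this
      have hmem : ((j : ℤ) + 1) ∈ aCands req := by
        unfold aCands
        refine List.mem_map.mpr ⟨rest[j], List.mem_filter.mpr ⟨?_, ?_⟩, ?_⟩
        · exact (isCompChar_mem_iff _).mp hcomp
        · simp only [decide_eq_true_eq, PySem.Str.find_eq, String.toList_ofList, hfch]
          omega
        · rw [PySem.Str.find_eq, String.toList_ofList, hfch]
      obtain ⟨m, hm⟩ : ∃ m, PySem.List.min? (aCands req) (fun x => x) = some m := by
        cases h : PySem.List.min? (aCands req) (fun x => x) with
        | none => exact absurd ((PySem.List.min?_eq_none_iff _ _).mp h) (List.ne_nil_of_mem hmem)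
        | some m => exact ⟨m, rfl⟩
      have hle : m ≤ (j : ℤ) + 1 := PySem.List.min?_isMin hm _ hmem
      have hge : (j : ℤ) + 1 ≤ m := by
        have hmmem := PySem.List.min?_mem hm
        unfold aCands at hmmem
        obtain ⟨c, hcf, hcm⟩ := List.mem_map.mp hmmem
        obtain ⟨hcmem, hcp⟩ := List.mem_filter.mp hcf
        have hpos : 0 < PySem.Chars.find req.toList [c] := by
          simpa [PySem.Str.find_eq, String.toList_ofList] using hcp
        obtain ⟨k, hk, hrk, hkmin, hfk, -⟩ := pos_find_elim hl hpos
        have hcompc : isCompChar c = true := (isCompChar_mem_iff c).mpr hcmem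
        have hjk : j ≤ k := by
          by_contra hlt
          have hni := hminj k (by omega)
          rw [hrk] at hni
          simp [hcompc] at hni
        rw [← hcm, PySem.Str.find_eq, String.toList_ofList, hfk]
        omega
      have hmj : m = (j : ℤ) + 1 := le_antisymm hle hge
      rw [hm, hmj, show (j : ℤ) + 1 = 1 + (j : ℤ) from by ring]

-- ===== VERDICT (by name: the statement is the Claim_ definition above) =====
theorem format_requirement_spec : Claim_equal_format_requirement := by
  intro req _ hpre
  exact main_equal req hpre
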